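-- pv_equiv track=rewrite | github.com/trytobebee/pichia-kb | src/kb_core/ingestion/normalizer.py | _best_confidence
-- ===== SOURCE A (Python) =====
-- def _best_confidence(values: list[str | None]) -> str | None:
--     for v in values:
--         if v == 'explicit':
--             return 'explicit'
--     for v in values:
--         if v == 'inferred':
--             return 'inferred'
--     return None
-- ===== SOURCE B (Python) =====
-- def _best_confidence(values):
--     saw_inferred = False
--     for v in values:
--         if v == 'explicit':
--             return 'explicit'
--         elif v == 'inferred':
--             saw_inferred = True
--     return 'inferred' if saw_inferred else None
-- ===== Notes on version B (the rewrite author's own statement) =====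
-- stated objective: simpler
-- what changed: Replaces A's two full scans (one for 'explicit', then a rescan for 'inferred') with a single pass that returns 'explicit' immediately and defers 'inferred' via a boolean flag.
import Mathlib
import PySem

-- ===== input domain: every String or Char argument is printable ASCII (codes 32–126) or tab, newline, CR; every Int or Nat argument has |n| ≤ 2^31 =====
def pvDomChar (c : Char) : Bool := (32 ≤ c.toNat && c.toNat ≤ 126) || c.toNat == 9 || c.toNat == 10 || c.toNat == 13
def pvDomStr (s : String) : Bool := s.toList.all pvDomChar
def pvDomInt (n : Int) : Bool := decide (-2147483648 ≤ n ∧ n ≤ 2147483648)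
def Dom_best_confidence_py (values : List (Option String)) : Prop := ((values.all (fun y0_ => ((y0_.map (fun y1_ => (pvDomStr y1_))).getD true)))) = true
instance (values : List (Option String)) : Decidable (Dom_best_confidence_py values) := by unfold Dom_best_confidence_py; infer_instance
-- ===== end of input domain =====

-- B merges A's two scans into one early-return pass with a saw_inferred flag (objective: simpler).

-- ===== PORT A =====
-- first loop of A: scan for 'explicit'
def bcFindExplicit : List (Option String) → Option String
  | [] => none
  | v :: rest => if v == some "explicit" then some "explicit" else bcFindExplicit rest

-- second loop of A: scan for 'inferred'
def bcFindInferred : List (Option String) → Option String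
  | [] => none
  | v :: rest => if v == some "inferred" then some "inferred" else bcFindInferred rest

def best_confidence_py (values : List (Option String)) : Option String :=
  match bcFindExplicit values with
  | some r => some r
  | none => bcFindInferred values

-- ===== PORT B =====
-- single pass carrying the saw_inferred flag
def bcScan : List (Option String) → Bool → Option String
  | [], saw => if saw then some "inferred" else none
  | v :: rest, saw =>
      if v == some "explicit" then some "explicit"
      else bcScan rest (saw || (v == some "inferred"))

def best_confidence_py_alt (values : List (Option String)) : Option String :=
  bcScan values false

-- ===== PRECONDITION & SPEC =====
def Spec_best_confidence_py (values : List (Option String)) (out : Option String) : Prop := out = best_confidence_py_alt values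
instance (values : List (Option String)) (out : Option String) : Decidable (Spec_best_confidence_py values out) := by unfold Spec_best_confidence_py; infer_instance

-- ===== CLAIM (what is proved, stated in full; the proofs are below) =====
def Claim_equal_best_confidence_py : Prop := ∀ (values : List (Option String)), Dom_best_confidence_py values → Spec_best_confidence_py values (best_confidence_py values)

-- ===== LEMMAS AND PROOFS =====

theorem bcFindExplicit_eq (vs : List (Option String)) :
    bcFindExplicit vs = if some "explicit" ∈ vs then some "explicit" else none := by
  induction vs with
  | nil => simp [bcFindExplicit]
  | cons v rest ih =>
    by_cases h : v = some "explicit" <;>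
      simp [bcFindExplicit, ih, h, eq_comm (a := some "explicit")]

theorem bcFindInferred_eq (vs : List (Option String)) :
    bcFindInferred vs = if some "inferred" ∈ vs then some "inferred" else none := by
  induction vs with
  | nil => simp [bcFindInferred]
  | cons v rest ih =>
    by_cases h : v = some "inferred" <;>
      simp [bcFindInferred, ih, h, eq_comm (a := some "inferred")]

theorem bcScan_eq (vs : List (Option String)) (saw : Bool) :
    bcScan vs saw =
      if some "explicit" ∈ vs then some "explicit"
      else if (saw || decide (some "inferred" ∈ vs)) then some "inferred" else none := by
  induction vs generalizing saw with
  | nil => simp [bcScan]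
  | cons v rest ih =>
    by_cases he : v = some "explicit"
    · simp [bcScan, he]
    · by_cases hi : v = some "inferred" <;> cases saw <;>
        simp [bcScan, ih, he, hi, Ne.symm he]
      all_goals simp [Ne.symm hi]

-- ===== VERDICT (by name: the statement is the Claim_ definition above) =====
theorem best_confidence_py_spec : Claim_equal_best_confidence_py := by
  intro values _
  unfold Spec_best_confidence_py best_confidence_py best_confidence_py_alt
  rw [bcFindExplicit_eq, bcFindInferred_eq, bcScan_eq]
  by_cases he : some "explicit" ∈ values <;>
    by_cases hi : some "inferred" ∈ values <;> simp [he, hi]
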